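-- pv_equiv track=rewrite | github.com/iwataka/google-code-jam | 2018/practice_round/senate_evacuation.py | solve
-- ===== SOURCE A (Python) =====
-- import operator
--
-- def solve(ps):
--     ordered_members = [chr(65 + x) for x in order_party_members(ps)]
--     members_count = len(ordered_members)
--     if members_count == 1:
--         return ordered_members[0]
--     elif members_count == 2:
--         return ordered_members[0] + ordered_members[1]
--     elif members_count == 3:
--         return "%s %s%s" % (ordered_members[0], ordered_members[1], ordered_members[2])
--     else:
--         result = []
--         for i in range(0, members_count, 2):
--             remaining_count = members_count - i
--             if remaining_count == 3:
--                 result.append(ordered_members[i])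
--                 result.append(ordered_members[i + 1] + ordered_members[i + 2])
--                 break
--             else:
--                 result.append(ordered_members[i] + ordered_members[i + 1])
--         return ' '.join(result)
--     return result
--
-- def order_party_members(ps):
--     result = []
--     while True:
--         max_i, max_v = max(enumerate(ps), key=operator.itemgetter(1))
--         if max_v == 0:
--             break
--         result.append(max_i)
--         ps[max_i] = max_v - 1
--     return result
-- ===== SOURCE B (Python) =====
-- def solve(ps):
--     # counting-sweep: for each level v from the max down to 1, every party that
--     # still has at least v senators releases one, in party order
--     m = max(ps)
--     letters = [chr(65 + i) for v in range(m, 0, -1) for i, p in enumerate(ps) if p >= v]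
--     n = len(letters)
--     if n % 2 == 0:
--         groups = [letters[i] + letters[i + 1] for i in range(0, n, 2)]
--     elif n == 1:
--         groups = letters
--     else:
--         groups = [letters[i] + letters[i + 1] for i in range(0, n - 3, 2)] \
--                  + [letters[n - 3], letters[n - 2] + letters[n - 1]]
--     return ' '.join(groups)
-- ===== Notes on version B (the rewrite author's own statement) =====
-- stated objective: faster
-- what changed: B replaces A's per-senator linear max-scan loop (one full scan of the party list for every emitted senator) with a single counting sweep over occupancy levels max..1 that emits all parties holding at least that level in index order, and replaces A's pair-building loop with index comprehensions over the letter list.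
import Mathlib
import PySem

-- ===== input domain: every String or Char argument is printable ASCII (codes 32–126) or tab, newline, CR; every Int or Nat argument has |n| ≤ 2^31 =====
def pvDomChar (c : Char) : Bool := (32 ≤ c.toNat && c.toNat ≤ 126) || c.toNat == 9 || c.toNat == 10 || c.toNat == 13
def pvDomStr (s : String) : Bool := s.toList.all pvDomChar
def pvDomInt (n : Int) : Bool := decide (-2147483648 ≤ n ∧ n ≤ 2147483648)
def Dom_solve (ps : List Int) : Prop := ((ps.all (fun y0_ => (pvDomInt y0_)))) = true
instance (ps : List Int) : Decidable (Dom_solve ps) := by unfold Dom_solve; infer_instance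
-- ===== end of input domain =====

-- B replaces A's repeated linear max-scan (one scan per evacuated senator) with a single
-- counting sweep over occupancy levels; equivalence is about the RETURN value only
-- (Python A also mutates its argument list in place; B does not).

-- chr(65 + i) for a party index i (both Pythons build exactly this character)
def chrOf (i : Int) : Char := Char.ofNat (65 + i).toNat

-- ===== PORT A =====

-- facts about max(enumerate(ps), key=itemgetter(1)) needed for termination of the loop port
theorem maxEnum_spec (ps : List Int) (i v : Int)
    (h : PySem.List.max? (PySem.List.enumerate ps) (fun p => p.2) = some (i, v)) :
    ∃ k : Nat, i = (k : Int) ∧ k < ps.length ∧ ps[k]? = some v := by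
  have hm := PySem.List.max?_mem h
  rcases (PySem.List.mem_enumerate_iff ps 0 (i, v)).1 hm with ⟨k, hk, hp⟩
  exact ⟨k, by simpa using congrArg Prod.fst hp,
         hk, by rw [List.getElem?_eq_getElem hk]; simpa using (congrArg Prod.snd hp).symm⟩

def pvSum (ps : List Int) : Nat := (ps.map Int.toNat).sum

theorem pvSum_set_lt (ps : List Int) (k : Nat) (v : Int)
    (hk : k < ps.length) (hv : ps[k]? = some v) (hpos : 0 < v) :
    pvSum (ps.set k (v - 1)) < pvSum ps := by
  have hkv : ps[k] = v := by rw [List.getElem?_eq_getElem hk] at hv; exact Option.some.inj hv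
  have hk' : k < (ps.map Int.toNat).length := by simpa using hk
  have h2 : (ps.map Int.toNat).set k v.toNat = ps.map Int.toNat := by
    have hg : (ps.map Int.toNat)[k] = v.toNat := by simp [hkv]
    rw [← hg]; exact List.set_getElem_self hk'
  unfold pvSum
  rw [List.map_set]
  conv_rhs => rw [← h2]
  rw [List.sum_set, List.sum_set]
  simp only [hk', if_pos]
  have ht : (v - 1).toNat < v.toNat := by omega
  omega

-- port of order_party_members's while loop.  Python breaks when the max is 0 and loops
-- forever when it is negative (all-negative input, outside Pre_); the Lean port stops in
-- both cases so that it terminates.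
def orderLoop (ps : List Int) : List Int :=
  match h : PySem.List.max? (PySem.List.enumerate ps) (fun p => p.2) with
  | none => []                      -- Python: ValueError from max() on an empty list (outside Pre_)
  | some (i, v) =>
    if hv : 0 < v then
      i :: orderLoop (ps.set i.toNat (v - 1))
    else []
termination_by pvSum ps
decreasing_by
  rcases maxEnum_spec ps i v h with ⟨k, hik, hk, hv'⟩
  have : i.toNat = k := by omega
  rw [this]
  exact pvSum_set_lt ps k v hk hv' hv

-- the for-loop over range(0, members_count, 2) with its remaining_count == 3 break
def aChunk : List (List Char) → List (List Char)
  | a :: b :: [c] => [a, b ++ c]            -- remaining_count == 3: append single, then pair, break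
  | a :: b :: rest => (a ++ b) :: aChunk rest
  | l => l                                  -- [] ends the loop; a 1-element list is unreachable here

def solve (ps : List Int) : String :=
  let om : List (List Char) := (orderLoop ps).map (fun x => [chrOf x])
  match om with
  | [a] => String.ofList a
  | [a, b] => String.ofList (a ++ b)
  | [a, b, c] => String.ofList (a ++ [' '] ++ b ++ c)   -- "%s %s%s"
  | l => String.ofList (PySem.Chars.join [' '] (aChunk l))

-- ===== PORT B =====
-- counting sweep (Source B): for each level v from max(ps) down to 1 every party with at
-- least v senators emits one member, in party order; then group pairwise with the odd
-- tail regrouped as single + pair.  pyGetD defaults are never read (indices in range).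
def solve_alt (ps : List Int) : String :=
  let m : Int := (PySem.List.max? ps (fun x => x)).getD 0  -- max(ps); none ↔ ps = [] (ValueError, outside Pre_)
  let letters : List Char :=
    (PySem.List.pyRange m 0 (-1)).flatMap (fun v =>
      ((PySem.List.enumerate ps).filter (fun ip => decide (v ≤ ip.2))).map (fun ip => chrOf ip.1))
  let n : Int := (letters.length : Int)
  let groups : List (List Char) :=
    if PySem.Int.mod n 2 == 0 then
      (PySem.List.pyRange 0 n 2).map (fun i =>
        [PySem.List.pyGetD letters i ' ', PySem.List.pyGetD letters (i + 1) ' '])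
    else if n == 1 then
      letters.map (fun c => [c])
    else
      (PySem.List.pyRange 0 (n - 3) 2).map (fun i =>
        [PySem.List.pyGetD letters i ' ', PySem.List.pyGetD letters (i + 1) ' ']) ++
      [[PySem.List.pyGetD letters (n - 3) ' '],
       [PySem.List.pyGetD letters (n - 2) ' ', PySem.List.pyGetD letters (n - 1) ' ']]
  String.ofList (PySem.Chars.join [' '] groups)

-- ===== PRECONDITION & SPEC =====
-- Pre_ excludes the empty list (max() raises ValueError in both programs) and lists whose
-- entries are all negative (A's while loop never reaches 0 there and loops forever, returning nothing).
def Pre_solve (ps : List Int) : Prop := ∃ x ∈ ps, 0 ≤ x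
instance (ps : List Int) : Decidable (Pre_solve ps) := by unfold Pre_solve; infer_instance

def pvWitness_solve : List Int := [3, 1, 2]

def Spec_solve (ps : List Int) (out : String) : Prop := out = solve_alt ps
instance (ps : List Int) (out : String) : Decidable (Spec_solve ps out) := by unfold Spec_solve; infer_instance

-- ===== CLAIM (what is proved, stated in full; the proofs are below) =====
def Claim_equal_solve : Prop := ∀ (ps : List Int), Dom_solve ps → Pre_solve ps → Spec_solve ps (solve ps)

-- ===== LEMMAS AND PROOFS =====

-- the index sequence emitted at one level v of the evacuation
def emitAt (ps : List Int) (v : Int) : List Int :=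
  ((PySem.List.enumerate ps 0).filter (fun p => decide (p.2 = v))).map (fun p => p.1)


theorem max?_cons_step {α κ : Type} [LinearOrder κ] (key : α → κ) (x y : α) (l : List α) :
    PySem.List.max? (x :: y :: l) key
      = PySem.List.max? ((if key x < key y then y else x) :: l) key := by
  simp only [PySem.List.max?, List.foldl_cons, apply_ite (f := fun a => some a)]

theorem max?_enum_aux (M : Int) : ∀ (t : List Int) (s : Int) (b : Int × Int),
    (∀ x ∈ t, x ≤ M) →
    (b.2 = M → PySem.List.max? (b :: PySem.List.enumerate t s) (fun p => p.2) = some b) ∧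
    (b.2 < M → M ∈ t → PySem.List.max? (b :: PySem.List.enumerate t s) (fun p => p.2)
        = some (s + (t.findIdx (fun x => x == M) : Int), M)) := by
  intro t
  induction t with
  | nil =>
    intro s b _
    exact ⟨fun _ => rfl, fun _ hm => by simp at hm⟩
  | cons c t ih =>
    intro s b hub
    rw [PySem.List.enumerate_cons, max?_cons_step]
    have hc_le : c ≤ M := hub c (by simp)
    have hub' : ∀ x ∈ t, x ≤ M := fun x hx => hub x (by simp [hx])
    constructor
    · intro hbM
      have hnot : ¬ b.2 < ((s, c) : Int × Int).2 := by simp only; omega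
      rw [if_neg hnot]
      exact (ih (s + 1) b hub').1 hbM
    · intro hbM hm
      by_cases hc : c = M
      · have hlt : b.2 < ((s, c) : Int × Int).2 := by simp only; omega
        rw [if_pos hlt]
        have h1 := (ih (s + 1) ((s, c) : Int × Int) hub').1 (by simpa using hc)
        rw [h1, List.findIdx_cons]
        simp [hc]
      · have hm' : M ∈ t := by
          rcases List.mem_cons.1 hm with h | h
          · exact absurd h.symm hc
          · exact h
        have hcM : c < M := lt_of_le_of_ne hc_le hc
        have hz : (if b.2 < ((s, c) : Int × Int).2 then ((s, c) : Int × Int) else b).2 < M := by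
          split
          · simpa using hcM
          · exact hbM
        have h2 := (ih (s + 1) _ hub').2 hz hm'
        rw [h2, List.findIdx_cons]
        have hcb : (c == M) = false := by simp [hc]
        rw [hcb]
        simp only [cond_false]
        congr 2
        push_cast
        ring

theorem maxEnum_first (M : Int) (ps : List Int) (s : Int)
    (hmem : M ∈ ps) (hub : ∀ x ∈ ps, x ≤ M) :
    PySem.List.max? (PySem.List.enumerate ps s) (fun p => p.2)
      = some (s + (ps.findIdx (fun x => x == M) : Int), M) := by
  match ps, hmem with
  | c :: t, hmem =>
    rw [PySem.List.enumerate_cons]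
    have hub' : ∀ x ∈ t, x ≤ M := fun x hx => hub x (by simp [hx])
    by_cases hc : c = M
    · have h1 := (max?_enum_aux M t (s + 1) ((s, c) : Int × Int) hub').1 (by simpa using hc)
      rw [h1, List.findIdx_cons]
      simp [hc]
    · have hm' : M ∈ t := by
        rcases List.mem_cons.1 hmem with h | h
        · exact absurd h.symm hc
        · exact h
      have hcM : c < M := lt_of_le_of_ne (hub c (by simp)) hc
      have h2 := (max?_enum_aux M t (s + 1) ((s, c) : Int × Int) hub').2 (by simpa using hcM) hm'
      rw [h2, List.findIdx_cons]
      have hcb : (c == M) = false := by simp [hc]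
      rw [hcb]
      simp only [cond_false]
      congr 2
      push_cast
      ring

theorem emit_set_first (M : Int) : ∀ (ps : List Int), M ∈ ps → ∀ (s : Int),
    ((PySem.List.enumerate ps s).filter (fun p => decide (p.2 = M))).map (fun p => p.1)
      = (s + (ps.findIdx (fun x => x == M) : Int)) ::
        ((PySem.List.enumerate (ps.set (ps.findIdx (fun x => x == M)) (M - 1)) s).filter
          (fun p => decide (p.2 = M))).map (fun p => p.1) := by
  intro ps
  induction ps with
  | nil => intro h; simp at h
  | cons c t ih =>
    intro hm s
    by_cases hc : c = M
    · subst hc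
      have hfi : List.findIdx (fun x => x == c) (c :: t) = 0 := by
        rw [List.findIdx_cons]; simp
      rw [hfi]
      simp only [List.set_cons_zero, PySem.List.enumerate_cons]
      rw [List.filter_cons_of_pos (by simp), List.filter_cons_of_neg (by simp)]
      simp
    · have hm' : M ∈ t := by
        rcases List.mem_cons.1 hm with h | h
        · exact absurd h.symm hc
        · exact h
      have hfi : List.findIdx (fun x => x == M) (c :: t)
          = List.findIdx (fun x => x == M) t + 1 := by
        rw [List.findIdx_cons]
        have : (c == M) = false := by simp [hc]
        rw [this]
        rfl
      rw [hfi, List.set_cons_succ]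
      simp only [PySem.List.enumerate_cons]
      rw [List.filter_cons_of_neg (by simp [hc]), List.filter_cons_of_neg (by simp [hc])]
      rw [ih hm' (s + 1)]
      congr 1
      push_cast
      ring

-- one round: the loop first emits every party sitting at the maximum M, in index order
theorem orderLoop_round (M : Int) (hM : 0 < M) :
    ∀ (k : Nat) (ps : List Int), ps.countP (fun x => x == M) = k → (∀ x ∈ ps, x ≤ M) →
    orderLoop ps = emitAt ps M ++ orderLoop (ps.map (fun x => if x = M then M - 1 else x)) := by
  intro k
  induction k with
  | zero =>
    intro ps hcnt hub
    have hno : ∀ a ∈ ps, a ≠ M := by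
      intro a ha
      have := List.countP_eq_zero.1 hcnt a ha
      simpa using this
    have hemit : emitAt ps M = [] := by
      unfold emitAt
      rw [List.filter_eq_nil_iff.2, List.map_nil]
      intro p hp
      rcases (PySem.List.mem_enumerate_iff ps 0 p).1 hp with ⟨j, hj, rfl⟩
      simpa using hno _ (by simp)
    have hmap : ps.map (fun x => if x = M then M - 1 else x) = ps := by
      conv_rhs => rw [← List.map_id ps]
      exact List.map_congr_left (fun a ha => by simp [hno a ha])
    rw [hemit, hmap, List.nil_append]
  | succ k ih =>
    intro ps hcnt hub
    have hm : M ∈ ps := by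
      by_contra h
      rw [List.countP_eq_zero.2 (fun a ha => by simp; rintro rfl; exact h ha)] at hcnt
      exact Nat.succ_ne_zero k hcnt.symm
    have hfi_lt : ps.findIdx (fun x => x == M) < ps.length :=
      List.findIdx_lt_length.2 ⟨M, hm, by simp⟩
    have hget : ps[ps.findIdx (fun x => x == M)] = M := by
      have := List.findIdx_getElem (w := hfi_lt)
      simpa using this
    have hmax := maxEnum_first M ps 0 hm hub
    have hmapset : (ps.set (ps.findIdx (fun x => x == M)) (M - 1)).map
          (fun x => if x = M then M - 1 else x) = ps.map (fun x => if x = M then M - 1 else x) := by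
      apply List.ext_getElem (by simp)
      intro n h1n h2n
      rw [List.getElem_map, List.getElem_map, List.getElem_set]
      by_cases hn : ps.findIdx (fun x => x == M) = n
      · subst hn
        rw [hget]
        simp
      · rw [if_neg hn]
    have hcnt' : (ps.set (ps.findIdx (fun x => x == M)) (M - 1)).countP (fun x => x == M) = k := by
      rw [List.countP_set hfi_lt, hget]
      simp at hcnt ⊢
      omega
    have hub' : ∀ x ∈ ps.set (ps.findIdx (fun x => x == M)) (M - 1), x ≤ M := by
      intro x hx
      rcases List.mem_or_eq_of_mem_set hx with h | rfl
      · exact hub x h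
      · omega
    have htail := ih (ps.set (ps.findIdx (fun x => x == M)) (M - 1)) hcnt' hub'
    rw [show emitAt ps M = (0 + ((ps.findIdx (fun x => x == M) : Nat) : Int)) ::
          emitAt (ps.set (ps.findIdx (fun x => x == M)) (M - 1)) M from emit_set_first M ps hm 0]
    conv_lhs => rw [orderLoop.eq_def]
    split
    · rename_i heq
      rw [hmax] at heq
      cases heq
    · rename_i i v heq
      rw [hmax] at heq
      injection heq with heq
      injection heq with hi hv
      subst hv
      rw [dif_pos hM]
      rw [← hi]
      have hnat : ((0 : Int) + ((ps.findIdx (fun x => x == M) : Nat) : Int)).toNat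
          = ps.findIdx (fun x => x == M) := by omega
      rw [hnat, List.cons_append]
      congr 1
      rw [htail, hmapset]


-- enumerate over a mapped list (no PySem lemma covers this shape)
theorem enumerate_map (f : Int → Int) : ∀ (l : List Int) (s : Int),
    PySem.List.enumerate (l.map f) s = (PySem.List.enumerate l s).map (fun p => (p.1, f p.2)) := by
  intro l
  induction l with
  | nil => intro s; rfl
  | cons x t ih =>
    intro s
    rw [List.map_cons, PySem.List.enumerate_cons, PySem.List.enumerate_cons, ih, List.map_cons]

-- the whole loop is the level-by-level counting sweep
theorem orderLoop_sweep : ∀ (m : Nat) (ps : List Int),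
    (∀ x ∈ ps, x ≤ (m : Int)) → (m = 0 ∨ ((m : Int) ∈ ps)) →
    orderLoop ps = (PySem.List.pyRange (m : Int) 0 (-1)).flatMap (fun v =>
      ((PySem.List.enumerate ps 0).filter (fun p => decide (v ≤ p.2))).map (fun p => p.1)) := by
  intro m
  induction m with
  | zero =>
    intro ps hb _
    rw [show ((0 : Nat) : Int) = 0 from rfl, PySem.List.pyRange_neg_one_eq_nil le_rfl,
        List.flatMap_nil]
    rw [orderLoop.eq_def]
    split
    · rfl
    · rename_i i v heq
      obtain ⟨k, hik, hk, hv⟩ := maxEnum_spec ps i v heq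
      have hgk : ps[k] = v := by
        rw [List.getElem?_eq_getElem hk] at hv
        exact Option.some.inj hv
      have h0 := hb ps[k] (List.getElem_mem hk)
      rw [dif_neg (by omega)]
  | succ m ih =>
    intro ps hb hatt
    have hm : (((m + 1 : Nat)) : Int) ∈ ps := by
      rcases hatt with h | h
      · exact absurd h (Nat.succ_ne_zero m)
      · exact h
    have hmM : (((m + 1 : Nat)) : Int) = (m : Int) + 1 := by push_cast; ring
    rw [hmM] at hm
    have hub : ∀ x ∈ ps, x ≤ (m : Int) + 1 := by
      intro x hx
      have := hb x hx
      omega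
    rw [orderLoop_round ((m : Int) + 1) (by omega) (ps.countP (fun x => x == (m : Int) + 1))
        ps rfl hub]
    rw [hmM, PySem.List.pyRange_neg_one_cons (by omega), List.flatMap_cons]
    congr 1
    · unfold emitAt
      congr 1
      apply List.filter_congr
      intro p hp
      rcases (PySem.List.mem_enumerate_iff ps 0 p).1 hp with ⟨j, hj, rfl⟩
      have := hub _ (List.getElem_mem hj)
      rw [decide_eq_decide]
      constructor
      · omega
      · omega
    · have hbs : ∀ x ∈ ps.map (fun x => if x = (m : Int) + 1 then (m : Int) + 1 - 1 else x),
          x ≤ (m : Int) := by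
        intro x hx
        rcases List.mem_map.1 hx with ⟨y, hy, rfl⟩
        have := hb y hy
        split <;> omega
      have hat : m = 0 ∨ ((m : Int) ∈ ps.map (fun x => if x = (m : Int) + 1 then (m : Int) + 1 - 1 else x)) := by
        by_cases h0 : m = 0
        · exact Or.inl h0
        · refine Or.inr ?_
          have := List.mem_map_of_mem (f := fun x => if x = (m : Int) + 1 then (m : Int) + 1 - 1 else x) hm
          simpa using this
      rw [ih _ hbs hat]
      have harith : (m : Int) + 1 - 1 = (m : Int) := by ring
      rw [harith]
      rw [List.flatMap_def, List.flatMap_def]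
      congr 1
      apply List.map_congr_left
      intro v hv
      have hvr := PySem.List.mem_pyRange_neg_one.1 hv
      rw [enumerate_map, List.filter_map, List.map_map]
      have hfil : (PySem.List.enumerate ps 0).filter
            ((fun p => decide (v ≤ p.2)) ∘ (fun p => (p.1, if p.2 = (m : Int) + 1 then (m : Int) else p.2)))
          = (PySem.List.enumerate ps 0).filter (fun p => decide (v ≤ p.2)) := by
        apply List.filter_congr
        intro p hp
        rcases (PySem.List.mem_enumerate_iff ps 0 p).1 hp with ⟨j, hj, rfl⟩
        have := hb _ (List.getElem_mem hj)
        simp only [Function.comp_apply]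
        rw [decide_eq_decide]
        split <;> omega
      rw [hfil]
      rfl

-- B's pairwise grouping, recursively
def pairsRec : List Char → List (List Char)
  | a :: b :: t => [a, b] :: pairsRec t
  | _ => []

theorem pyGetD_cons_succ {α : Type} (x : α) (xs : List α) (i : Int) (d : α) (h : 0 ≤ i) :
    PySem.List.pyGetD (x :: xs) (i + 1) d = PySem.List.pyGetD xs i d := by
  rw [PySem.List.pyGetD_of_nonneg _ _ (by omega), PySem.List.pyGetD_of_nonneg _ _ h]
  have : (i + 1).toNat = i.toNat + 1 := by omega
  rw [this, List.getD_cons_succ]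

theorem range_pairs (d : Char) : ∀ (k : Nat) (l : List Char), 2 * k ≤ l.length →
    (List.range k).map (fun (j : Nat) =>
        [PySem.List.pyGetD l (2 * (j : Int)) d, PySem.List.pyGetD l (2 * (j : Int) + 1) d])
      = pairsRec (l.take (2 * k)) := by
  intro k
  induction k with
  | zero => intro l _; simp [pairsRec]
  | succ k ih =>
    intro l hl
    match l, hl with
    | a :: b :: t, hl =>
      rw [List.range_succ_eq_map, List.map_cons, List.map_map]
      have h0 : PySem.List.pyGetD (a :: b :: t) (2 * ((0 : Nat) : Int)) d = a := by
        norm_num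
      have h1 : PySem.List.pyGetD (a :: b :: t) (2 * ((0 : Nat) : Int) + 1) d = b := by
        norm_num
        rw [show (1 : Int) = 0 + 1 from by norm_num, pyGetD_cons_succ _ _ _ _ le_rfl]
        norm_num
      rw [h0, h1]
      have hshift : ∀ j : Nat,
          ((fun (j : Nat) => [PySem.List.pyGetD (a :: b :: t) (2 * (j : Int)) d,
              PySem.List.pyGetD (a :: b :: t) (2 * (j : Int) + 1) d]) ∘ Nat.succ) j
            = [PySem.List.pyGetD t (2 * (j : Int)) d, PySem.List.pyGetD t (2 * (j : Int) + 1) d] := by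
        intro j
        simp only [Function.comp_apply]
        have e1 : (2 : Int) * ((Nat.succ j : Nat) : Int) = (2 * (j : Int) + 1) + 1 := by
          push_cast; ring
        rw [e1, pyGetD_cons_succ _ _ _ _ (by omega), pyGetD_cons_succ _ _ _ _ (by omega),
            pyGetD_cons_succ _ _ _ _ (by omega), pyGetD_cons_succ _ _ _ _ (by omega)]
      rw [List.map_congr_left (fun j _ => hshift j)]
      have htk : (a :: b :: t).take (2 * (k + 1)) = a :: b :: t.take (2 * k) := by
        have : 2 * (k + 1) = (2 * k + 1) + 1 := by omega
        rw [this, List.take_succ_cons, List.take_succ_cons]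
      rw [htk]
      show _ = pairsRec (a :: b :: t.take (2 * k))
      rw [show pairsRec (a :: b :: t.take (2 * k)) = [a, b] :: pairsRec (t.take (2 * k)) from rfl]
      rw [ih t (by simp at hl; omega)]

theorem pyRange_two (k : Nat) :
    PySem.List.pyRange 0 (2 * (k : Int)) 2 = (List.range k).map (fun (j : Nat) => 2 * (j : Int)) := by
  rw [PySem.List.pyRange_of_pos _ _ (by norm_num)]
  rcases Nat.eq_zero_or_pos k with rfl | hk
  · simp
  · have hif : (if (0 : Int) < 2 * (k : Int) then ((2 * (k : Int) - 0 + 2 - 1) / 2).toNat else 0) = k := by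
      rw [if_pos (by omega)]
      omega
    rw [hif]
    apply List.map_congr_left
    intro j _
    ring

theorem aChunk_even : ∀ (l : List Char), l.length % 2 = 0 →
    aChunk (l.map (fun c => [c])) = pairsRec l := by
  intro l
  induction l using pairsRec.induct with
  | case1 a b t ih =>
    intro h
    match t with
    | [] => rfl
    | [x] => simp at h
    | x :: y :: t' =>
      rw [show ((a :: b :: x :: y :: t').map (fun c => [c]))
            = [a] :: [b] :: ((x :: y :: t').map (fun c => [c])) from rfl]
      rw [show aChunk ([a] :: [b] :: ((x :: y :: t').map (fun c => [c])))
            = ([a] ++ [b]) :: aChunk ((x :: y :: t').map (fun c => [c])) from rfl]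
      rw [ih (by simp at h ⊢; omega)]
      rfl
  | case2 t ht =>
    intro h
    match t, ht with
    | [], _ => rfl
    | [x], _ => simp at h
    | x :: y :: t', ht => exact (ht x y t' rfl).elim

theorem aChunk_odd : ∀ (l : List Char), l.length % 2 = 0 → ∀ (a b c : Char),
    aChunk ((l ++ [a, b, c]).map (fun c => [c])) = pairsRec l ++ [[a], [b, c]] := by
  intro l
  induction l using pairsRec.induct with
  | case1 x y t ih =>
    intro h a b c
    rw [show (((x :: y :: t) ++ [a, b, c]).map (fun c => [c]))
          = [x] :: [y] :: ((t ++ [a, b, c]).map (fun c => [c])) from rfl]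
    have hlen : ((t ++ [a, b, c]).map (fun c => [c])).length = t.length + 3 := by simp
    have hstep : aChunk ([x] :: [y] :: ((t ++ [a, b, c]).map (fun c => [c])))
        = ([x] ++ [y]) :: aChunk ((t ++ [a, b, c]).map (fun c => [c])) := by
      match ht : (t ++ [a, b, c]).map (fun c => [c]) with
      | [] => rw [ht] at hlen; simp at hlen
      | [z] => rw [ht] at hlen; simp at hlen
      | z :: w :: r => rfl
    rw [hstep, ih (by simp at h ⊢; omega) a b c]
    rfl
  | case2 t ht =>
    intro h a b c
    match t, ht with
    | [], _ => rfl
    | [x], _ => simp at h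
    | x :: y :: t', ht => exact (ht x y t' rfl).elim

-- A's four-way format dispatch is the joined aChunk in every case
theorem solve_eq_join (ps : List Int) :
    solve ps = String.ofList (PySem.Chars.join [' ']
      (aChunk ((orderLoop ps).map (fun x => [chrOf x])))) := by
  unfold solve
  match hm : (orderLoop ps).map (fun x => [chrOf x]) with
  | [] => rfl
  | [a] =>
    rw [show aChunk [a] = [a] from rfl, PySem.Chars.join_singleton]
  | [a, b] =>
    rw [show aChunk [a, b] = [a ++ b] from rfl, PySem.Chars.join_singleton]
  | [a, b, c] =>
    rw [show aChunk [a, b, c] = [a, b ++ c] from rfl, PySem.Chars.join_cons_cons,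
        PySem.Chars.join_singleton]
    simp [List.append_assoc]
  | a :: b :: c :: d :: t => rfl

-- the glue: A's grouping of any letter sequence equals B's index-computed grouping
theorem chunk_eq_groups (l : List Char) :
    aChunk (l.map (fun c => [c])) =
      (if PySem.Int.mod (l.length : Int) 2 == 0 then
        (PySem.List.pyRange 0 (l.length : Int) 2).map (fun i =>
          [PySem.List.pyGetD l i ' ', PySem.List.pyGetD l (i + 1) ' '])
      else if (l.length : Int) == 1 then
        l.map (fun c => [c])
      else
        (PySem.List.pyRange 0 ((l.length : Int) - 3) 2).map (fun i =>
          [PySem.List.pyGetD l i ' ', PySem.List.pyGetD l (i + 1) ' ']) ++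
        [[PySem.List.pyGetD l ((l.length : Int) - 3) ' '],
         [PySem.List.pyGetD l ((l.length : Int) - 2) ' ',
          PySem.List.pyGetD l ((l.length : Int) - 1) ' ']]) := by
  have hmod : PySem.Int.mod (l.length : Int) 2 = ((l.length % 2 : Nat) : Int) := by
    rw [PySem.Int.mod_eq_emod_of_pos (by norm_num)]
    omega
  by_cases he : l.length % 2 = 0
  · have hcond : (PySem.Int.mod (l.length : Int) 2 == 0) = true := by
      rw [hmod, he]
      rfl
    rw [hcond, if_pos rfl]
    obtain ⟨k, hk⟩ : ∃ k, l.length = 2 * k := ⟨l.length / 2, by omega⟩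
    have hcast : (l.length : Int) = 2 * (k : Int) := by rw [hk]; push_cast; ring
    rw [hcast, pyRange_two, List.map_map]
    simp only [Function.comp_def]
    rw [range_pairs ' ' k l (by omega)]
    rw [← hk, List.take_length]
    exact aChunk_even l he
  · have hcond : (PySem.Int.mod (l.length : Int) 2 == 0) = false := by
      rw [hmod]
      have : l.length % 2 = 1 := by omega
      rw [this]
      rfl
    simp only [hcond, Bool.false_eq_true, if_false]
    by_cases h1 : l.length = 1
    · match l, h1 with
      | [c], _ =>
        rw [if_pos (by rfl)]
        rfl
    · have h3 : 3 ≤ l.length := by omega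
      have hne1 : ((l.length : Int) == 1) = false := by
        simp
        omega
      simp only [hne1, Bool.false_eq_true, if_false]
      obtain ⟨k, hk⟩ : ∃ k, l.length = 2 * k + 3 := ⟨(l.length - 3) / 2, by omega⟩
      match hd : l.drop (2 * k) with
      | [] =>
        have := congrArg List.length hd
        simp [List.length_drop] at this
        omega
      | [a] =>
        have := congrArg List.length hd
        simp [List.length_drop] at this
        omega
      | [a, b] =>
        have := congrArg List.length hd
        simp [List.length_drop] at this
        omega
      | a :: b :: c :: r =>
        have hr : r = [] := by
          have := congrArg List.length hd
          simp [List.length_drop] at this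
          simpa using List.length_eq_zero_iff.1 (by omega)
        subst hr
        have ha : l[2 * k]? = some a := by
          have := congrArg (fun t => t[(0 : Nat)]?) hd
          simpa [List.getElem?_drop] using this
        have hb : l[2 * k + 1]? = some b := by
          have := congrArg (fun t => t[(1 : Nat)]?) hd
          simpa [List.getElem?_drop] using this
        have hc : l[2 * k + 2]? = some c := by
          have := congrArg (fun t => t[(2 : Nat)]?) hd
          simpa [List.getElem?_drop] using this
        have hl : l = l.take (2 * k) ++ [a, b, c] := by
          conv_lhs => rw [← List.take_append_drop (2 * k) l]
          rw [hd]
        have hcast : (l.length : Int) - 3 = 2 * (k : Int) := by rw [hk]; push_cast; ring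
        rw [hcast, pyRange_two, List.map_map]
        simp only [Function.comp_def]
        rw [range_pairs ' ' k l (by omega)]
        have hga : PySem.List.pyGetD l (2 * (k : Int)) ' ' = a := by
          rw [show 2 * (k : Int) = ((2 * k : Nat) : Int) from by push_cast; ring]
          rw [PySem.List.pyGetD_of_nonneg _ _ (by positivity)]
          rw [Int.toNat_natCast, List.getD_eq_getElem?_getD, ha]
          rfl
        have hgb : PySem.List.pyGetD l ((l.length : Int) - 2) ' ' = b := by
          rw [show (l.length : Int) - 2 = ((2 * k + 1 : Nat) : Int) from by rw [hk]; push_cast; ring]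
          rw [PySem.List.pyGetD_of_nonneg _ _ (by positivity)]
          rw [Int.toNat_natCast, List.getD_eq_getElem?_getD, hb]
          rfl
        have hgc : PySem.List.pyGetD l ((l.length : Int) - 1) ' ' = c := by
          rw [show (l.length : Int) - 1 = ((2 * k + 2 : Nat) : Int) from by rw [hk]; push_cast; ring]
          rw [PySem.List.pyGetD_of_nonneg _ _ (by positivity)]
          rw [Int.toNat_natCast, List.getD_eq_getElem?_getD, hc]
          rfl
        rw [hga, hgb, hgc]
        conv_lhs => rw [hl]
        exact aChunk_odd (l.take (2 * k)) (by simp [List.length_take]; omega) a b c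

-- ===== VERDICT (by name: the statement is the Claim_ definition above) =====
theorem solve_spec : Claim_equal_solve := by
  intro ps _ hpre
  unfold Spec_solve
  obtain ⟨x0, hx0m, hx0⟩ := hpre
  match ps, hx0m with
  | a :: t, hx0m =>
    have hmax : PySem.List.max? (a :: t) (fun x => x) = some (t.foldl max a) :=
      PySem.List.max?_id_cons a t
    have hub : ∀ x ∈ a :: t, x ≤ t.foldl max a := by
      intro x hx
      rcases List.mem_cons.1 hx with rfl | hx
      · exact (PySem.List.le_foldl_max t x).1
      · exact (PySem.List.le_foldl_max t a).2 x hx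
    have hmem : t.foldl max a ∈ a :: t := by
      rcases PySem.List.foldl_max_mem t a with h | h
      · rw [h]; simp
      · simp [h]
    have h0F : 0 ≤ t.foldl max a := le_trans hx0 (hub x0 hx0m)
    have hcast : (((t.foldl max a).toNat : Nat) : Int) = t.foldl max a := Int.toNat_of_nonneg h0F
    have hsweep := orderLoop_sweep (t.foldl max a).toNat (a :: t)
      (fun x hx => hcast ▸ hub x hx) (Or.inr (hcast ▸ hmem))
    rw [hcast] at hsweep
    have hletters : (PySem.List.pyRange (t.foldl max a) 0 (-1)).flatMap (fun v =>
          ((PySem.List.enumerate (a :: t)).filter (fun ip => decide (v ≤ ip.2))).map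
            (fun ip => chrOf ip.1))
        = (orderLoop (a :: t)).map chrOf := by
      rw [hsweep, List.map_flatMap]
      simp only [List.map_map, Function.comp_def]
    rw [solve_eq_join]
    have hom : (orderLoop (a :: t)).map (fun x => [chrOf x])
        = ((orderLoop (a :: t)).map chrOf).map (fun c => [c]) := by
      simp only [List.map_map, Function.comp_def]
    rw [hom, chunk_eq_groups]
    show _ = solve_alt (a :: t)
    simp only [solve_alt]
    rw [hmax]
    simp only [Option.getD_some]
    rw [hletters]
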